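-- pv_equiv track=rewrite | github.com/jo13310/FM_Reloaded | src/mod_detector.py | _detect_graphics_subtype
-- ===== SOURCE A (Python) =====
-- from typing import Dict, List, Optional, Tuple, Any
--
-- def _detect_graphics_subtype(file_list: List[str]) -> Optional[str]:
--     """Detect the subtype of graphics mod."""
--     file_list_lower = [f.lower() for f in file_list]
--
--     # Check for kits
--     if any('kit' in f for f in file_list_lower):
--         return "kits"
--
--     # Check for faces/portraits
--     if any(keyword in f for f in file_list_lower
--            for keyword in ['face', 'portrait', 'player']):
--         return "faces"
--
--     # Check for logos/badges
--     if any(keyword in f for f in file_list_lower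
--            for keyword in ['logo', 'badge', 'icon']):
--         return "logos"
--
--     return None
-- ===== SOURCE B (Python) =====
-- def _detect_graphics_subtype(file_list):
--     """Detect the subtype of graphics mod (single pass, fixed priority)."""
--     has_face = False
--     has_logo = False
--     for f in file_list:
--         fl = f.lower()
--         if 'kit' in fl:
--             return "kits"
--         has_face = has_face or any(k in fl for k in ('face', 'portrait', 'player'))
--         has_logo = has_logo or any(k in fl for k in ('logo', 'badge', 'icon'))
--     if has_face:
--         return "faces"
--     if has_logo:
--         return "logos"
--     return None
-- ===== Notes on version B (the rewrite author's own statement) =====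
-- stated objective: alternative
-- what changed: Replaces three separate full scans of the lowercased list with a single pass that early-returns on a kit keyword and records face/logo matches in boolean flags resolved by fixed priority after the loop.
import Mathlib
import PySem

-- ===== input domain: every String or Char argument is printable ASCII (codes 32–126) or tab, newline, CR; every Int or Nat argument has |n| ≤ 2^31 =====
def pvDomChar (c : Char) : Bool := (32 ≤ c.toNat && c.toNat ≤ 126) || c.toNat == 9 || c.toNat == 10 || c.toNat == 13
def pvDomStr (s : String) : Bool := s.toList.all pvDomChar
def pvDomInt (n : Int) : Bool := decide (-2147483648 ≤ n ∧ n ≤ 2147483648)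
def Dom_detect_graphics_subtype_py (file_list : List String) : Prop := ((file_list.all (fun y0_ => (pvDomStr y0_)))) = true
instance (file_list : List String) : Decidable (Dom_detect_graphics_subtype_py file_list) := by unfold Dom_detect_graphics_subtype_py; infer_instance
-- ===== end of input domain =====

-- B replaces A's three repeated scans with one pass keeping face/logo flags (return value only; no speed claim).

-- ===== PORT A =====
def detect_graphics_subtype_py (file_list : List String) : Option String :=
  let file_list_lower := file_list.map PySem.Str.lower
  if file_list_lower.any (fun f => PySem.Str.isIn "kit" f) then
    some "kits"
  else if file_list_lower.any (fun f =>
      (["face", "portrait", "player"] : List String).any (fun keyword => PySem.Str.isIn keyword f)) then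
    some "faces"
  else if file_list_lower.any (fun f =>
      (["logo", "badge", "icon"] : List String).any (fun keyword => PySem.Str.isIn keyword f)) then
    some "logos"
  else
    none

-- ===== PORT B =====
-- the single loop of Source B: early return on 'kit', flags for face/logo resolved after the loop
def detectAltLoop : List String → Bool → Bool → Option String
  | [], has_face, has_logo =>
    if has_face then some "faces" else if has_logo then some "logos" else none
  | f :: rest, has_face, has_logo =>
    let fl := PySem.Str.lower f
    if PySem.Str.isIn "kit" fl then some "kits"
    else
      detectAltLoop rest
        (has_face || (["face", "portrait", "player"] : List String).any (fun k => PySem.Str.isIn k fl))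
        (has_logo || (["logo", "badge", "icon"] : List String).any (fun k => PySem.Str.isIn k fl))

def detect_graphics_subtype_py_alt (file_list : List String) : Option String :=
  detectAltLoop file_list false false

-- ===== PRECONDITION & SPEC =====
def Spec_detect_graphics_subtype_py (file_list : List String) (out : Option String) : Prop := out = detect_graphics_subtype_py_alt file_list
instance (file_list : List String) (out : Option String) : Decidable (Spec_detect_graphics_subtype_py file_list out) := by unfold Spec_detect_graphics_subtype_py; infer_instance

-- ===== CLAIM (what is proved, stated in full; the proofs are below) =====
def Claim_equal_detect_graphics_subtype_py : Prop := ∀ (file_list : List String), Dom_detect_graphics_subtype_py file_list → Spec_detect_graphics_subtype_py file_list (detect_graphics_subtype_py file_list)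

-- ===== LEMMAS AND PROOFS =====
theorem detectAltLoop_char (l : List String) (hf hl : Bool) :
    detectAltLoop l hf hl =
      if l.any (fun f => PySem.Str.isIn "kit" (PySem.Str.lower f)) then some "kits"
      else if hf || l.any (fun f =>
          (["face", "portrait", "player"] : List String).any (fun k => PySem.Str.isIn k (PySem.Str.lower f))) then some "faces"
      else if hl || l.any (fun f =>
          (["logo", "badge", "icon"] : List String).any (fun k => PySem.Str.isIn k (PySem.Str.lower f))) then some "logos"
      else none := by
  induction l generalizing hf hl with
  | nil => simp [detectAltLoop]
  | cons f rest ih =>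
    simp only [detectAltLoop, List.any_cons]
    by_cases hk : PySem.Str.isIn "kit" (PySem.Str.lower f) = true
    · simp only [hk, Bool.true_or, if_true]
    · simp only [Bool.not_eq_true] at hk
      rw [ih]
      simp only [hk, Bool.false_or, Bool.false_eq_true, if_false, Bool.or_assoc,
        List.any_cons, List.any_nil, Bool.or_false]

-- ===== VERDICT (by name: the statement is the Claim_ definition above) =====
theorem detect_graphics_subtype_py_spec : Claim_equal_detect_graphics_subtype_py := by
  intro file_list _
  unfold Spec_detect_graphics_subtype_py detect_graphics_subtype_py detect_graphics_subtype_py_alt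
  rw [detectAltLoop_char]
  simp [List.any_map, Function.comp_def]
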